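-- pv_equiv track=rewrite | github.com/buildcleveragent/wms | allapp/products/models.py | _gtin_mod10_is_valid
-- ===== SOURCE A (Python) =====
-- def _gtin_mod10_is_valid(num: str) -> bool:
--     """
--     GS1 Mod10 校验位校验（传入完整含校验位）
--     做法：对“去掉校验位”的主体自右向左加权（3,1,3,1...），
--     计算得到的校验位应等于末位。
--     """
--     if not num or not num.isdigit() or len(num) < 2:
--         return False
--     body, check_digit = num[:-1], int(num[-1])
--     total = 0
--     for i, ch in enumerate(reversed(body), start=1):
--         d = int(ch)
--         weight = 3 if i % 2 == 1 else 1  # 右起第1位（不含校验位）权重3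
--         total += d * weight
--     calc = (10 - (total % 10)) % 10
--     return calc == check_digit
-- ===== SOURCE B (Python) =====
-- def _gtin_mod10_is_valid(num: str) -> bool:
--     if not num or not num.isdigit() or len(num) < 2:
--         return False
--     triple = single = 0
--     for c in num:
--         triple, single = single, triple + int(c)
--     return (3 * triple + single) % 10 == 0
-- ===== Notes on version B (the rewrite author's own statement) =====
-- stated objective: alternative
-- what changed: Replaces A's right-to-left enumerate(reversed(body)) pass with a 3/1 parity branch plus check-digit recomputation by a left-to-right Luhn-style two-accumulator swap (triple, single = single, triple + d) over the whole string and a divisibility test (3*triple + single) % 10 == 0.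
import Mathlib
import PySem

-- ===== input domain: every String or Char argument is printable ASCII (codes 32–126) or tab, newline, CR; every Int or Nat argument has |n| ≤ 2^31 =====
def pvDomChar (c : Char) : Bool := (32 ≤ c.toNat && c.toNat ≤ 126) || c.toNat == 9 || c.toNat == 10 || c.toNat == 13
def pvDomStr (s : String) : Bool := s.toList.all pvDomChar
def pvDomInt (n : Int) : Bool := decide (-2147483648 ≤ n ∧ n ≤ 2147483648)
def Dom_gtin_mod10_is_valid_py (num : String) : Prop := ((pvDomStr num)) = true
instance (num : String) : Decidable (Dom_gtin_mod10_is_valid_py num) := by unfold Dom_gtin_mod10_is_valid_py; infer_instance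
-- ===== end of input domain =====

-- B replaces A's branched right-to-left weighted pass and check-digit recomputation by a
-- left-to-right Luhn-style two-accumulator swap over the WHOLE string plus a divisibility
-- test (total % 10 == 0) — objective: alternative; same cost.

-- int(ch) for a single character, shared verbatim by both ports
def pvDig (c : Char) : Int := (PySem.Int.ofChars? [c]).getD 0

-- ===== PORT A =====
def gtin_mod10_is_valid_py (num : String) : Bool :=
  let cs := num.toList
  if cs.isEmpty || !(PySem.Str.strIsdigit num) || decide (cs.length < 2) then false
  else
    let body := PySem.List.slice cs none (some (-1))
    let check_digit := pvDig ((PySem.List.pyGet? cs (-1)).getD ' ')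
    let total := (PySem.List.enumerate body.reverse 1).foldl
      (fun t p => t + pvDig p.2 * (if p.1 % 2 == 1 then 3 else 1)) 0
    let calcd := PySem.Int.mod (10 - PySem.Int.mod total 10) 10
    decide (calcd = check_digit)

-- ===== PORT B =====
def gtin_mod10_is_valid_py_alt (num : String) : Bool :=
  let cs := num.toList
  if cs.isEmpty || !(PySem.Str.strIsdigit num) || decide (cs.length < 2) then false
  else
    let p := cs.foldl (fun (p : Int × Int) c => (p.2, p.1 + pvDig c)) (0, 0)
    PySem.Int.mod (3 * p.1 + p.2) 10 == 0

-- ===== PRECONDITION & SPEC =====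
def Spec_gtin_mod10_is_valid_py (num : String) (out : Bool) : Prop := out = gtin_mod10_is_valid_py_alt num
instance (num : String) (out : Bool) : Decidable (Spec_gtin_mod10_is_valid_py num out) := by unfold Spec_gtin_mod10_is_valid_py; infer_instance

-- ===== CLAIM (what is proved, stated in full; the proofs are below) =====
def Claim_equal_gtin_mod10_is_valid_py : Prop := ∀ (num : String), Dom_gtin_mod10_is_valid_py num → Spec_gtin_mod10_is_valid_py num (gtin_mod10_is_valid_py num)

-- ===== LEMMAS AND PROOFS =====

-- (even-index digit sum, odd-index digit sum) of a (reversed) digit list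
def pvEO : List Char → Int × Int
  | [] => (0, 0)
  | a :: l => (pvDig a + (pvEO l).2, (pvEO l).1)

-- value of int(c) on a single decimal digit character
theorem pvDig_digit (c : Char) (h : PySem.Chars.isdigit c = true) :
    pvDig c = (c.toNat : Int) - 48 := by
  have : PySem.Int.ofChars? [c] = some ((c.toNat : Int) - 48) := by
    simp [PySem.Chars.isdigit, Char.le_def, UInt32.le_iff_toNat_le] at h
    have hmem : c ∈ ['0','1','2','3','4','5','6','7','8','9'] := by
      simp only [List.mem_cons, List.not_mem_nil, or_false, Char.ext_iff, UInt32.ext_iff]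
      show c.val.toNat = 48 ∨ c.val.toNat = 49 ∨ c.val.toNat = 50 ∨ c.val.toNat = 51
        ∨ c.val.toNat = 52 ∨ c.val.toNat = 53 ∨ c.val.toNat = 54 ∨ c.val.toNat = 55
        ∨ c.val.toNat = 56 ∨ c.val.toNat = 57
      simp only [Char.toNat] at h
      omega
    fin_cases hmem <;> decide
  simp [pvDig, this]

-- A's weighted fold over enumerate(r, s) in terms of pvEO r, by the parity of s
theorem pvLemA (r : List Char) : ∀ (s t : Int),
    (PySem.List.enumerate r s).foldl
      (fun t p => t + pvDig p.2 * (if p.1 % 2 == 1 then 3 else 1)) t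
      = t + (if s % 2 = 1 then 3 * (pvEO r).1 + (pvEO r).2 else (pvEO r).1 + 3 * (pvEO r).2) := by
  induction r with
  | nil => intro s t; simp [PySem.List.enumerate_nil, pvEO]
  | cons a l ih =>
      intro s t
      simp only [PySem.List.enumerate_cons, List.foldl_cons]
      rw [ih (s + 1)]
      rcases Int.emod_two_eq s with hs | hs
      · have w : (s % 2 == 1) = false := by simp [hs]
        have w' : (s + 1) % 2 = 1 := by omega
        rw [w, if_pos w', if_neg (show ¬ s % 2 = 1 by omega)]
        simp [pvEO]; ring
      · have w : (s % 2 == 1) = true := by simp [hs]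
        have w' : ¬ (s + 1) % 2 = 1 := by omega
        rw [w, if_neg w', if_pos hs]
        simp [pvEO]; ring

-- B's swap fold over cs computes (odd-index sum, even-index sum) of cs.reverse
theorem pvLemB (r : List Char) :
    r.reverse.foldl (fun (p : Int × Int) c => (p.2, p.1 + pvDig c)) (0, 0)
      = ((pvEO r).2, (pvEO r).1) := by
  induction r with
  | nil => simp [pvEO]
  | cons a l ih =>
      simp only [List.reverse_cons, List.foldl_append, List.foldl_cons, List.foldl_nil, ih]
      simp [pvEO]
      ring

-- the check-digit comparison is the divisibility of the full weighted sum
theorem pvModIff (t cd : Int) (h0 : 0 ≤ cd) (h9 : cd ≤ 9) :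
    (PySem.Int.mod (10 - PySem.Int.mod t 10) 10 = cd) ↔ (PySem.Int.mod (t + cd) 10 = 0) := by
  simp only [PySem.Int.mod_eq_emod_of_pos (show (0:Int) < 10 by norm_num)]
  omega

-- ===== VERDICT (by name: the statement is the Claim_ definition above) =====
theorem gtin_mod10_is_valid_py_spec : Claim_equal_gtin_mod10_is_valid_py := by
  intro num _
  unfold Spec_gtin_mod10_is_valid_py gtin_mod10_is_valid_py gtin_mod10_is_valid_py_alt
  simp only []
  split
  · rfl
  · rename_i hguard
    rw [Bool.or_eq_true, Bool.or_eq_true] at hguard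
    push Not at hguard
    have hne : num.toList ≠ [] := by
      intro h; have := hguard.1.1; simp [h] at this
    have hdig : PySem.Str.strIsdigit num = true := by
      have := hguard.1.2; simpa using this
    -- split the string into its body and last character
    obtain ⟨l, c, hlc⟩ : ∃ l c, num.toList = l ++ [c] := by
      rcases List.eq_nil_or_concat num.toList with h | ⟨l, c, h⟩
      · exact absurd h hne
      · exact ⟨l, c, by simpa using h⟩
    have hslice : PySem.List.slice num.toList none (some (-1)) = l := by
      rw [PySem.List.slice_to_neg_one, hlc, List.dropLast_concat]
    have hlast : PySem.List.pyGet? num.toList (-1) = some c := by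
      rw [hlc, PySem.List.pyGet?_neg_one_append_singleton]
    have hcdig : PySem.Chars.isdigit c = true := by
      rw [PySem.Str.strIsdigit_eq, PySem.Chars.strIsdigit, hlc] at hdig
      simp at hdig
      exact hdig.2
    have hcd : pvDig c = (c.toNat : Int) - 48 := pvDig_digit c hcdig
    have hbounds : 0 ≤ pvDig c ∧ pvDig c ≤ 9 := by
      simp only [PySem.Chars.isdigit, Bool.and_eq_true, decide_eq_true_eq] at hcdig
      have h1 : '0'.toNat ≤ c.toNat := by
        have h := hcdig.1; rw [Char.le_def, UInt32.le_iff_toNat_le] at h; exact h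
      have h2 : c.toNat ≤ '9'.toNat := by
        have h := hcdig.2; rw [Char.le_def, UInt32.le_iff_toNat_le] at h; exact h
      have e0 : '0'.toNat = 48 := by decide
      have e9 : '9'.toNat = 57 := by decide
      rw [hcd]
      omega
    rw [hslice, hlast]
    simp only [Option.getD_some]
    rw [pvLemA l.reverse 1 0, if_pos (by decide)]
    rw [hlc]
    have hfold : (l ++ [c]).foldl (fun (p : Int × Int) c => (p.2, p.1 + pvDig c)) (0, 0)
        = ((pvEO l.reverse).1, pvDig c + (pvEO l.reverse).2) := by
      have h := pvLemB (c :: l.reverse)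
      simpa [pvEO] using h
    rw [hfold]
    have harith : 3 * (pvEO l.reverse).1 + (pvDig c + (pvEO l.reverse).2)
        = (0 + (3 * (pvEO l.reverse).1 + (pvEO l.reverse).2)) + pvDig c := by ring
    rw [harith]
    have hiff := pvModIff (0 + (3 * (pvEO l.reverse).1 + (pvEO l.reverse).2)) (pvDig c)
      hbounds.1 hbounds.2
    show decide _ = decide _
    exact decide_eq_decide.mpr hiff
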